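-- pv_equiv track=rewrite | github.com/vivekup3424/Coding_Problems | leetcode/python/count-residue-prefixes.py | residuePrefixes
-- ===== SOURCE A (Python) =====
-- def residuePrefixes(s: str)->int:
--     st:set[str]= set()
--     count = 0
--     for i in range(len(s)):
--         st.add(s[i])
--         if (i+1)%3 == len(st):
--             count+=1
--     return count
-- ===== SOURCE B (Python) =====
-- def residuePrefixes(s: str) -> int:
--     # one scan finds p = index where the 2nd distinct char appears and
--     # q = index where the 3rd appears (default len(s)); then counts by arithmetic
--     n = len(s)
--     p = q = n
--     first = None
--     second = None
--     for i, c in enumerate(s):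
--         if first is None:
--             first = c
--         elif c != first and second is None:
--             second = c
--             p = i
--         elif c != first and c != second:
--             q = i
--             break
--     return (p + 2) // 3 + (q + 1) // 3 - (p + 1) // 3
-- ===== Notes on version B (the rewrite author's own statement) =====
-- stated objective: faster
-- what changed: Instead of maintaining a set and testing (i+1)%3 == len(set) at every index, B scans once only to find the indices p and q where the 2nd and 3rd distinct characters first appear (breaking out at q) and computes the answer in closed form as (p+2)//3 + (q+1)//3 - (p+1)//3.
import Mathlib
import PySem

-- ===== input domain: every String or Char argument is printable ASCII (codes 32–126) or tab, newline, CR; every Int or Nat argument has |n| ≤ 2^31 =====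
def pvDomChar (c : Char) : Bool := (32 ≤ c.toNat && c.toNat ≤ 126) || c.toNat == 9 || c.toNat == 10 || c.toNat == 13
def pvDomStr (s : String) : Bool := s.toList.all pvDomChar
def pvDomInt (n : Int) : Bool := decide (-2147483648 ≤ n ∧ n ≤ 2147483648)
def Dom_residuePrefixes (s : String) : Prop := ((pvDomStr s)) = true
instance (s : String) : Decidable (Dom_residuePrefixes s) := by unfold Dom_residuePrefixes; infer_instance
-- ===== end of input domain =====

-- B replaces A's per-prefix set-size test by one scan for the indices where the 2nd/3rd
-- distinct characters first appear plus closed-form residue counting (objective: alternative).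

-- ===== PORT A =====
-- A's loop over i in range(len(s)); the Python set holds the one-character strings s[i],
-- modelled exactly as a PySem.Set of the corresponding characters.
def residuePrefixesLoop (l : List Char) (i : Nat) (st : PySem.Set Char) (count : Int) : Int :=
  match l with
  | [] => count
  | c :: t =>
    let st' := PySem.Set.add st c
    residuePrefixesLoop t (i + 1)
      st' (if PySem.Int.mod ((i : Int) + 1) 3 = PySem.Set.len st' then count + 1 else count)

def residuePrefixes (s : String) : Int :=
  residuePrefixesLoop s.toList 0 PySem.Set.empty 0

-- ===== PORT B =====
-- Source B's loop with break, as recursion over the characters; returns the final (p, q).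
def findPQ : List Char → Nat → Option Char → Option Char → Int → Int → Int × Int
  | [], _, _, _, p, q => (p, q)
  | c :: t, i, first, second, p, q =>
    match first with
    | none => findPQ t (i + 1) (some c) second p q
    | some f =>
      match second with
      | none =>
        if c ≠ f then findPQ t (i + 1) (some f) (some c) (i : Int) q
        else findPQ t (i + 1) (some f) none p q
      | some sd =>
        if c ≠ f ∧ c ≠ sd then (p, (i : Int))
        else findPQ t (i + 1) (some f) (some sd) p q

def residuePrefixes_alt (s : String) : Int :=
  let n : Int := (s.toList.length : Int)
  let pq := findPQ s.toList 0 none none n n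
  PySem.Int.floordiv (pq.1 + 2) 3 + PySem.Int.floordiv (pq.2 + 1) 3
    - PySem.Int.floordiv (pq.1 + 1) 3

-- ===== PRECONDITION & SPEC =====
def Spec_residuePrefixes (s : String) (out : Int) : Prop := out = residuePrefixes_alt s
instance (s : String) (out : Int) : Decidable (Spec_residuePrefixes s out) := by unfold Spec_residuePrefixes; infer_instance

-- ===== CLAIM (what is proved, stated in full; the proofs are below) =====
def Claim_equal_residuePrefixes : Prop := ∀ (s : String), Dom_residuePrefixes s → Spec_residuePrefixes s (residuePrefixes s)

-- ===== LEMMAS AND PROOFS =====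

theorem pvMod3 (x : Int) : PySem.Int.mod x 3 = x % 3 :=
  PySem.Int.mod_eq_emod_of_pos (by norm_num)

theorem pvDiv3 (x : Int) : PySem.Int.floordiv x 3 = x / 3 :=
  PySem.Int.floordiv_eq_ediv_of_pos (by norm_num)

theorem pvAddLen {st : PySem.Set Char} {c : Char} :
    st.length ≤ (PySem.Set.add st c).length := by
  unfold PySem.Set.add
  split
  · exact le_refl _
  · simp

-- Once the set has 3 or more elements the condition can never fire again.
theorem loopA_saturated (l : List Char) :
    ∀ (i : Nat) (st : PySem.Set Char) (count : Int), 3 ≤ st.length →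
      residuePrefixesLoop l i st count = count := by
  induction l with
  | nil => intro i st count _; rfl
  | cons c t ih =>
    intro i st count h
    have h1 : st.length ≤ (PySem.Set.add st c).length := pvAddLen
    have hm : PySem.Int.mod ((i : Int) + 1) 3 < 3 :=
      PySem.Int.mod_lt _ (by norm_num)
    have hne : ¬ (PySem.Int.mod ((i : Int) + 1) 3 = PySem.Set.len (PySem.Set.add st c)) := by
      unfold PySem.Set.len
      omega
    simp only [residuePrefixesLoop, if_neg hne]
    exact ih (i + 1) _ count (le_trans h h1)

-- In the second=some phase, findPQ never changes the first component.
theorem findPQ_fst (l : List Char) :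
    ∀ (i : Nat) (f sd : Char) (p q : Int),
      (findPQ l i (some f) (some sd) p q).1 = p := by
  induction l with
  | nil => intro i f sd p q; rfl
  | cons c t ih =>
    intro i f sd p q
    simp only [findPQ]
    split
    · rfl
    · exact ih (i + 1) f sd p q

-- Phase 2 (set = {a, b}): A's remaining count equals the residue-1 tally up to q.
theorem loopA_phase2 (l : List Char) :
    ∀ (i : Nat) (a b : Char) (count : Int) (p0 q0 : Int), a ≠ b →
      q0 = (i : Int) + l.length →
      residuePrefixesLoop l i [a, b] count =
        count + ((findPQ l i (some a) (some b) p0 q0).2 + 1) / 3 - ((i : Int) + 1) / 3 := by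
  induction l with
  | nil =>
    intro i a b count p0 q0 _ hq
    simp only [residuePrefixesLoop, findPQ, List.length_nil] at *
    push_cast at hq ⊢
    omega
  | cons c t ih =>
    intro i a b count p0 q0 hab hq
    have hq' : q0 = ((i + 1 : Nat) : Int) + t.length := by
      simp only [List.length_cons] at hq; push_cast at hq ⊢; omega
    by_cases hca : c = a
    · have hadd : PySem.Set.add [a, b] c = [a, b] := by
        simp [PySem.Set.add, hca]
      have hfp : findPQ (c :: t) i (some a) (some b) p0 q0 =
          findPQ t (i + 1) (some a) (some b) p0 q0 := by
        simp [findPQ, hca]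
      rw [hfp]
      simp only [residuePrefixesLoop, hadd]
      rw [ih (i + 1) a b _ p0 q0 hab hq']
      have := pvMod3 ((i : Int) + 1)
      unfold PySem.Set.len
      simp only [List.length_cons, List.length_nil]
      push_cast
      split <;> omega
    · by_cases hcb : c = b
      · have hadd : PySem.Set.add [a, b] c = [a, b] := by
          simp [PySem.Set.add, hcb]
        have hfp : findPQ (c :: t) i (some a) (some b) p0 q0 =
            findPQ t (i + 1) (some a) (some b) p0 q0 := by
          simp [findPQ, hcb]
        rw [hfp]
        simp only [residuePrefixesLoop, hadd]
        rw [ih (i + 1) a b _ p0 q0 hab hq']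
        have := pvMod3 ((i : Int) + 1)
        unfold PySem.Set.len
        simp only [List.length_cons, List.length_nil]
        push_cast
        split <;> omega
      · -- third distinct character: break in B, saturation in A
        have hadd : PySem.Set.add [a, b] c = [a, b, c] := by
          simp [PySem.Set.add, hca, hcb]
        have hfp : findPQ (c :: t) i (some a) (some b) p0 q0 = (p0, (i : Int)) := by
          simp [findPQ, hca, hcb]
        rw [hfp]
        simp only [residuePrefixesLoop, hadd]
        have hm : PySem.Int.mod ((i : Int) + 1) 3 < 3 := PySem.Int.mod_lt _ (by norm_num)
        have hne : ¬ (PySem.Int.mod ((i : Int) + 1) 3 = PySem.Set.len [a, b, c]) := by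
          unfold PySem.Set.len; simp; omega
        rw [if_neg hne, loopA_saturated t (i + 1) [a, b, c] count (by simp)]
        omega

-- Phase 1 (set = {a}): A's remaining count equals the two closed-form tallies.
theorem loopA_phase1 (l : List Char) :
    ∀ (i : Nat) (a : Char) (count : Int) (d : Int),
      d = (i : Int) + l.length →
      residuePrefixesLoop l i [a] count =
        count + ((findPQ l i (some a) none d d).1 + 2) / 3 - ((i : Int) + 2) / 3
          + ((findPQ l i (some a) none d d).2 + 1) / 3
          - ((findPQ l i (some a) none d d).1 + 1) / 3 := by
  induction l with
  | nil =>
    intro i a count d hd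
    simp only [residuePrefixesLoop, findPQ, List.length_nil] at *
    push_cast at hd ⊢
    omega
  | cons c t ih =>
    intro i a count d hd
    have hd' : d = ((i + 1 : Nat) : Int) + t.length := by
      simp only [List.length_cons] at hd; push_cast at hd ⊢; omega
    by_cases hca : c = a
    · have hadd : PySem.Set.add [a] c = [a] := by simp [PySem.Set.add, hca]
      have hfp : findPQ (c :: t) i (some a) none d d =
          findPQ t (i + 1) (some a) none d d := by
        simp [findPQ, hca]
      rw [hfp]
      simp only [residuePrefixesLoop, hadd]
      rw [ih (i + 1) a _ d hd']
      have := pvMod3 ((i : Int) + 1)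
      unfold PySem.Set.len
      simp only [List.length_cons, List.length_nil]
      push_cast
      split <;> omega
    · -- second distinct character appears here: p := i
      have hadd : PySem.Set.add [a] c = [a, c] := by simp [PySem.Set.add, hca]
      have hfp : findPQ (c :: t) i (some a) none d d =
          findPQ t (i + 1) (some a) (some c) (i : Int) d := by
        simp [findPQ, hca]
      rw [hfp]
      simp only [residuePrefixesLoop, hadd]
      rw [loopA_phase2 t (i + 1) a c _ (i : Int) d (fun h => hca h.symm) hd']
      rw [findPQ_fst t (i + 1) a c (i : Int) d]
      have := pvMod3 ((i : Int) + 1)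
      unfold PySem.Set.len
      simp only [List.length_cons, List.length_nil]
      push_cast
      split <;> omega

theorem residuePrefixes_eq_alt (s : String) :
    residuePrefixes s = residuePrefixes_alt s := by
  unfold residuePrefixes residuePrefixes_alt
  cases hL : s.toList with
  | nil => simp [residuePrefixesLoop, findPQ, PySem.Int.floordiv]
  | cons c t =>
    have hadd : PySem.Set.add PySem.Set.empty c = [c] := by
      simp [PySem.Set.add, PySem.Set.empty]
    simp only [residuePrefixesLoop, hadd, findPQ]
    rw [if_pos]
    · rw [loopA_phase1 t (0 + 1) c (0 + 1) ((List.length (c :: t) : Int))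
        (by simp only [List.length_cons]; push_cast; omega)]
      rw [pvDiv3, pvDiv3, pvDiv3]
      simp only [List.length_cons]
      push_cast
      omega
    · rw [pvMod3]; unfold PySem.Set.len; simp

-- ===== VERDICT (by name: the statement is the Claim_ definition above) =====
theorem residuePrefixes_spec : Claim_equal_residuePrefixes := by
  intro s _
  unfold Spec_residuePrefixes
  exact residuePrefixes_eq_alt s
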